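-- pv_equiv track=rewrite | github.com/zeshanalvi/LCS-Algorithms | lcs/MLCS1992.py | mlcsdp
-- ===== SOURCE A (Python) =====
-- def mlcsdp(sequences):
--     num_sequences = len(sequences)
--     lengths = [len(seq) for seq in sequences]
--
--     # Initialize the DP table with zeros
--     dp = {}
--
--     def dp_value(indices):
--         if indices in dp:
--             return dp[indices]
--         if any(index == 0 for index in indices):
--             dp[indices] = 0
--             return 0
--
--         matching = [sequences[i][indices[i] - 1] for i in range(num_sequences)]
--         if all(char == matching[0] for char in matching):
--             dp[indices] = dp_value(tuple(index - 1 for index in indices)) + 1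
--         else:
--             dp[indices] = max(dp_value(tuple(indices[i] - (i == j) for i in range(num_sequences))) for j in range(num_sequences))
--         return dp[indices]
--
--     lcs_length = dp_value(tuple(length for length in lengths))
--
--     # Recover the MLCS from the DP table
--     def recover_lcs(indices):
--         if any(index == 0 for index in indices):
--             return ""
--         matching = [sequences[i][indices[i] - 1] for i in range(num_sequences)]
--         if all(char == matching[0] for char in matching):
--             return recover_lcs(tuple(index - 1 for index in indices)) + matching[0]
--         for j in range(num_sequences):
--             if dp_value(indices) == dp_value(tuple(indices[i] - (i == j) for i in range(num_sequences))):
--                 return recover_lcs(tuple(indices[i] - (i == j) for i in range(num_sequences)))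
--         return ""
--
--     lcs = recover_lcs(tuple(length for length in lengths))
--     return lcs_length, lcs
-- ===== SOURCE B (Python) =====
-- def mlcsdp(sequences):
--     # Bottom-up iterative DP: fill a table over all index tuples with every coordinate
--     # >= 1 in lexicographic order (cells with a zero coordinate are implicitly 0 via
--     # dp.get), then recover with an explicit while-loop (first-j tie-break), building
--     # the string back-to-front.
--     if not sequences:
--         return 0, ""
--     n = len(sequences)
--     lengths = [len(s) for s in sequences]
--     # all index tuples (i_0,...,i_{n-1}) with 1 <= i_k <= lengths[k], lexicographic order
--     cells = [()]
--     for ln in reversed(lengths):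
--         cells = [(i,) + rest for i in range(1, ln + 1) for rest in cells]
--     dp = {}
--     for idx in cells:
--         chars = [sequences[i][idx[i] - 1] for i in range(n)]
--         if all(c == chars[0] for c in chars):
--             dp[idx] = dp.get(tuple(i - 1 for i in idx), 0) + 1
--         else:
--             dp[idx] = max(dp.get(idx[:j] + (idx[j] - 1,) + idx[j + 1:], 0) for j in range(n))
--     full = tuple(lengths)
--     out = []
--     idx = full
--     while 0 not in idx:
--         chars = [sequences[i][idx[i] - 1] for i in range(n)]
--         if all(c == chars[0] for c in chars):
--             out.append(chars[0])
--             idx = tuple(i - 1 for i in idx)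
--         else:
--             for j in range(n):
--                 nb = idx[:j] + (idx[j] - 1,) + idx[j + 1:]
--                 if dp.get(idx, 0) == dp.get(nb, 0):
--                     idx = nb
--                     break
--             else:
--                 break
--     return dp.get(full, 0), "".join(reversed(out))
-- ===== Notes on version B (the rewrite author's own statement) =====
-- stated objective: alternative
-- what changed: Replaces the memoized top-down recursion (and recursive recovery) by a bottom-up iterative DP that fills the table over all index tuples in lexicographic order and recovers the subsequence with an explicit while-loop building the string back-to-front.
import Mathlib
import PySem

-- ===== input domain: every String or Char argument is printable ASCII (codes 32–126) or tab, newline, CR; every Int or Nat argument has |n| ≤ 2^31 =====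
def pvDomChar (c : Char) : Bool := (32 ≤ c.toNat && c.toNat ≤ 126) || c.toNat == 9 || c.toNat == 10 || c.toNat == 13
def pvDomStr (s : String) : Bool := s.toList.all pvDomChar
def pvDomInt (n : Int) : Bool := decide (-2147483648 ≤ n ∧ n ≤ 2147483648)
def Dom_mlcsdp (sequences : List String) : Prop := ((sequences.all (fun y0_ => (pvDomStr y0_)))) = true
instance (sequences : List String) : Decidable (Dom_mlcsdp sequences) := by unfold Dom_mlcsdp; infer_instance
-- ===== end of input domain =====

-- B replaces A's memoized top-down recursion by a bottom-up table filled in lexicographic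
-- order plus an explicit while-loop recovery (objective: alternative, not claimed faster).
-- A raises RecursionError on the empty list (excluded by Pre_); B returns (0, "") there.

-- ===== PORT A =====

-- shared index/character helpers (both Pythons form the same tuples and char lists)
-- tuple(index - 1 for index in indices)
def pvDecAll (idx : List Nat) : List Nat := idx.map (· - 1)

-- tuple(indices[i] - (i == j) for i in range(n))
def pvDecJ (idx : List Nat) (j : Nat) : List Nat :=
  idx.mapIdx (fun i v => if i = j then v - 1 else v)

-- [sequences[i][indices[i] - 1] for i in range(num_sequences)]: the comprehension over
-- range(n) with indexing, written as zipWith — exact, since |indices| = num_sequences = |ss|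
-- at every call (the default ' ' is never read: each index is in range when looked up).
def pvChars (ss : List (List Char)) (idx : List Nat) : List Char :=
  List.zipWith (fun (s : List Char) (v : Nat) => s.getD (v - 1) ' ') ss idx

-- all(char == matching[0] for char in matching)
def pvAllEq (l : List Char) : Bool :=
  match l with
  | [] => true
  | c :: _ => l.all (fun x => x == c)

-- sum of the all-decremented tuple is smaller: the termination measure of the recursions
theorem pvSum_decAll_lt {idx : List Nat} (hne : idx ≠ []) (hz : ∀ x ∈ idx, x ≠ 0) :
    (pvDecAll idx).sum < idx.sum := by
  cases idx with
  | nil => exact absurd rfl hne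
  | cons a t =>
    have h1 : ∀ l : List Nat, (pvDecAll l).sum ≤ l.sum := by
      intro l; induction l with
      | nil => simp [pvDecAll]
      | cons x xs ih => simp only [pvDecAll, List.map_cons, List.sum_cons] at *; omega
    have := h1 t
    have ha : a ≠ 0 := hz a (by simp)
    simp only [pvDecAll, List.map_cons, List.sum_cons] at *
    omega

theorem pvNotMem_zero {idx : List Nat} (h : 0 ∉ idx) : ∀ x ∈ idx, x ≠ 0 :=
  fun _ hx hx0 => h (hx0 ▸ hx)

-- dp_value, with the memo dict threaded through (pvDpA = dp_value, pvDpAMax = the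
-- 'max(dp_value(...) for j in range(num_sequences))' generator, left to right).
-- The 'idx = []' / non-decreasing branches are termination guards only: Python
-- recurses forever there (RecursionError); they are unreachable under Pre_.
mutual
def pvDpA (ss : List (List Char)) (d : PySem.Dict (List Nat) Nat) (idx : List Nat) :
    Nat × PySem.Dict (List Nat) Nat :=
  match d.get? idx with
  | some v => (v, d)
  | none =>
    if idx.any (· == 0) then (0, d.insert idx 0)
    else if hne : idx = [] then (0, d.insert idx 0)   -- termination guard, unreachable under Pre_
    else
      if pvAllEq (pvChars ss idx) then
        let r := pvDpA ss d (pvDecAll idx)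
        (r.1 + 1, r.2.insert idx (r.1 + 1))
      else
        let r := pvDpAMax ss d idx (List.range ss.length) none
        ((r.1.getD 0), r.2.insert idx (r.1.getD 0))
termination_by (idx.sum, 1, 0)
decreasing_by
  · exact Prod.Lex.left _ _ (pvSum_decAll_lt hne (by intro x hx hx0; subst hx0; revert hx; simp_all))
  · exact Prod.Lex.right _ (Prod.Lex.left _ _ (by omega))

def pvDpAMax (ss : List (List Char)) (d : PySem.Dict (List Nat) Nat) (idx : List Nat)
    (js : List Nat) (acc : Option Nat) : Option Nat × PySem.Dict (List Nat) Nat :=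
  match js with
  | [] => (acc, d)
  | j :: js' =>
    let c := pvDecJ idx j
    if h : c.sum < idx.sum then
      let r := pvDpA ss d c
      pvDpAMax ss r.2 idx js' (some (match acc with | none => r.1 | some a => max a r.1))
    else
      pvDpAMax ss d idx js' acc   -- termination guard, unreachable under Pre_
termination_by (idx.sum, 0, js.length)
decreasing_by
  · exact Prod.Lex.left _ _ h
  · exact Prod.Lex.right _ (Prod.Lex.right _ (by simp))
  · exact Prod.Lex.right _ (Prod.Lex.right _ (by simp))
end

-- recover_lcs, threading the same memo dict (pvRecAFind = the first-j loop, which calls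
-- dp_value twice per iteration exactly as the Python does).
mutual
def pvRecA (ss : List (List Char)) (d : PySem.Dict (List Nat) Nat) (idx : List Nat) :
    List Char × PySem.Dict (List Nat) Nat :=
  if idx.any (· == 0) then ([], d)
  else if hne : idx = [] then ([], d)   -- termination guard, unreachable under Pre_
  else
    let m := pvChars ss idx
    if pvAllEq m then
      let r := pvRecA ss d (pvDecAll idx)
      (r.1 ++ [m.headD ' '], r.2)
    else
      pvRecAFind ss d idx (List.range ss.length)
termination_by (idx.sum, 1, 0)
decreasing_by
  · exact Prod.Lex.left _ _ (pvSum_decAll_lt hne (by intro x hx hx0; subst hx0; revert hx; simp_all))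
  · exact Prod.Lex.right _ (Prod.Lex.left _ _ (by omega))

def pvRecAFind (ss : List (List Char)) (d : PySem.Dict (List Nat) Nat) (idx : List Nat)
    (js : List Nat) : List Char × PySem.Dict (List Nat) Nat :=
  match js with
  | [] => ([], d)
  | j :: js' =>
    let r0 := pvDpA ss d idx
    let c := pvDecJ idx j
    let r1 := pvDpA ss r0.2 c
    if r0.1 = r1.1 then
      if h : c.sum < idx.sum then pvRecA ss r1.2 c
      else ([], r1.2)   -- termination guard, unreachable under Pre_
    else
      pvRecAFind ss r1.2 idx js'
termination_by (idx.sum, 0, js.length)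
decreasing_by
  · exact Prod.Lex.left _ _ h
  · exact Prod.Lex.right _ (Prod.Lex.right _ (by simp))
end

def mlcsdp (sequences : List String) : Int × String :=
  let ss := sequences.map (·.toList)
  let lengths := ss.map List.length
  let r := pvDpA ss PySem.Dict.empty lengths
  let s := pvRecA ss r.2 lengths
  ((r.1 : Int), String.ofList s.1)

-- ===== PORT B =====

-- idx[:j] + (idx[j] - 1,) + idx[j+1:]  (only ever used with j < len(idx))
def pvDecJSlice (idx : List Nat) (j : Nat) : List Nat :=
  idx.take j ++ (idx.getD j 0 - 1) :: idx.drop (j + 1)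

-- cells = [(i,) + rest for i in range(1, ln + 1) for rest in cells], ln over reversed(lengths)
def pvCells (lengths : List Nat) : List (List Nat) :=
  lengths.reverse.foldl
    (fun cs ln => (List.range' 1 ln).flatMap (fun i => cs.map (i :: ·))) [[]]

-- the body of B's fill loop (idx has no zero coordinate; dp.get(..., 0) is getD _ 0)
def pvFillB (ss : List (List Char)) (d : PySem.Dict (List Nat) Nat) (idx : List Nat) :
    PySem.Dict (List Nat) Nat :=
  let m := pvChars ss idx
  if pvAllEq m then d.insert idx (d.getD (pvDecAll idx) 0 + 1)
  else
    d.insert idx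
      ((PySem.List.max? ((List.range ss.length).map (fun j => d.getD (pvDecJSlice idx j) 0))
        (fun x => x)).getD 0)

-- B's while-loop recovery; out accumulates appended chars, reversed at the end.
-- The 'idx = []' / non-decreasing branches are termination guards (unreachable: B
-- returns early on the empty sequences list).
def pvRecB (ss : List (List Char)) (d : PySem.Dict (List Nat) Nat) (idx : List Nat)
    (out : List Char) : List Char :=
  if idx.any (· == 0) then out
  else if hne : idx = [] then out   -- termination guard, unreachable
  else
    let m := pvChars ss idx
    if pvAllEq m then pvRecB ss d (pvDecAll idx) (out ++ [m.headD ' '])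
    else
      match (List.range ss.length).find?
          (fun j => d.getD idx 0 == d.getD (pvDecJSlice idx j) 0) with
      | some j =>
        if h : (pvDecJSlice idx j).sum < idx.sum then pvRecB ss d (pvDecJSlice idx j) out
        else out   -- termination guard, unreachable
      | none => out
termination_by idx.sum
decreasing_by
  · exact pvSum_decAll_lt hne (pvNotMem_zero (by simp_all))
  · exact h

def mlcsdp_alt (sequences : List String) : Int × String :=
  if sequences = [] then (0, "")
  else
    let ss := sequences.map (·.toList)
    let lengths := ss.map List.length
    let d := (pvCells lengths).foldl (pvFillB ss) PySem.Dict.empty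
    let res := pvRecB ss d lengths []
    ((d.getD lengths 0 : Int), String.ofList res.reverse)

-- ===== PRECONDITION & SPEC =====
-- Pre_ excludes only the empty sequences list, on which A recurses without bound
-- (RecursionError); everywhere else A returns normally.
def Pre_mlcsdp (sequences : List String) : Prop := sequences ≠ []
instance (sequences : List String) : Decidable (Pre_mlcsdp sequences) := by
  unfold Pre_mlcsdp; infer_instance

def pvWitness_mlcsdp : List String := ["ab", "cab"]

def Spec_mlcsdp (sequences : List String) (out : Int × String) : Prop := out = mlcsdp_alt sequences
instance (sequences : List String) (out : Int × String) : Decidable (Spec_mlcsdp sequences out) := by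
  unfold Spec_mlcsdp; infer_instance

-- ===== CLAIM (what is proved, stated in full; the proofs are below) =====
def Claim_equal_mlcsdp : Prop := ∀ (sequences : List String), Dom_mlcsdp sequences → Pre_mlcsdp sequences → Spec_mlcsdp sequences (mlcsdp sequences)

-- ===== LEMMAS AND PROOFS =====

-- the common value both programs compute: the pure dp recursion (same branch structure as
-- A's dp_value, with the dict stripped out)
mutual
def pvSpecDp (ss : List (List Char)) (idx : List Nat) : Nat :=
  if idx.any (· == 0) then 0
  else if hne : idx = [] then 0
  else
    if pvAllEq (pvChars ss idx) then pvSpecDp ss (pvDecAll idx) + 1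
    else (pvSpecMax ss idx (List.range ss.length) none).getD 0
termination_by (idx.sum, 1, 0)
decreasing_by
  · exact Prod.Lex.left _ _ (pvSum_decAll_lt hne (by intro x hx hx0; subst hx0; revert hx; simp_all))
  · exact Prod.Lex.right _ (Prod.Lex.left _ _ (by omega))

def pvSpecMax (ss : List (List Char)) (idx : List Nat) (js : List Nat) (acc : Option Nat) :
    Option Nat :=
  match js with
  | [] => acc
  | j :: js' =>
    let c := pvDecJ idx j
    if h : c.sum < idx.sum then
      let v := pvSpecDp ss c
      pvSpecMax ss idx js' (some (match acc with | none => v | some a => max a v))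
    else
      pvSpecMax ss idx js' acc
termination_by (idx.sum, 0, js.length)
decreasing_by
  · exact Prod.Lex.left _ _ h
  · exact Prod.Lex.right _ (Prod.Lex.right _ (by simp))
  · exact Prod.Lex.right _ (Prod.Lex.right _ (by simp))
end

-- the pure recovery (same branch structure as A's recover_lcs)
mutual
def pvRecPure (ss : List (List Char)) (idx : List Nat) : List Char :=
  if idx.any (· == 0) then []
  else if hne : idx = [] then []
  else
    let m := pvChars ss idx
    if pvAllEq m then pvRecPure ss (pvDecAll idx) ++ [m.headD ' ']
    else pvRecFindPure ss idx (List.range ss.length)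
termination_by (idx.sum, 1, 0)
decreasing_by
  · exact Prod.Lex.left _ _ (pvSum_decAll_lt hne (by intro x hx hx0; subst hx0; revert hx; simp_all))
  · exact Prod.Lex.right _ (Prod.Lex.left _ _ (by omega))

def pvRecFindPure (ss : List (List Char)) (idx : List Nat) (js : List Nat) : List Char :=
  match js with
  | [] => []
  | j :: js' =>
    let c := pvDecJ idx j
    if pvSpecDp ss idx = pvSpecDp ss c then
      (if h : c.sum < idx.sum then pvRecPure ss c else [])
    else pvRecFindPure ss idx js'
termination_by (idx.sum, 0, js.length)
decreasing_by
  · exact Prod.Lex.left _ _ h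
  · exact Prod.Lex.right _ (Prod.Lex.right _ (by simp))
end

-- a memo dict is correct when every stored value is the spec value of its key
def pvCorrect (ss : List (List Char)) (d : PySem.Dict (List Nat) Nat) : Prop :=
  ∀ k v, d.get? k = some v → v = pvSpecDp ss k

theorem pvCorrect_empty (ss : List (List Char)) : pvCorrect ss (PySem.Dict.empty) := by
  intro k v h
  simp [PySem.Dict.get?_empty] at h

theorem pvCorrect_insert {ss : List (List Char)} {d : PySem.Dict (List Nat) Nat}
    (hd : pvCorrect ss d) {k : List Nat} {v : Nat} (hv : v = pvSpecDp ss k) :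
    pvCorrect ss (d.insert k v) := by
  intro k' v' h
  rw [PySem.Dict.get?_insert] at h
  split at h
  · cases h; subst ‹k' = k›; exact hv
  · exact hd k' v' h

theorem pvDpAMax_spec (ss : List (List Char)) (idx : List Nat)
    (IH : ∀ c : List Nat, c.sum < idx.sum → ∀ d, pvCorrect ss d →
      (pvDpA ss d c).1 = pvSpecDp ss c ∧ pvCorrect ss (pvDpA ss d c).2) :
    ∀ js acc d, pvCorrect ss d →
      (pvDpAMax ss d idx js acc).1 = pvSpecMax ss idx js acc ∧
        pvCorrect ss (pvDpAMax ss d idx js acc).2 := by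
  intro js
  induction js with
  | nil => intro acc d hd; rw [pvDpAMax, pvSpecMax]; exact ⟨rfl, hd⟩
  | cons j js' ihjs =>
    intro acc d hd
    rw [pvDpAMax, pvSpecMax]
    by_cases h : (pvDecJ idx j).sum < idx.sum
    · simp only [h, dif_pos]
      obtain ⟨hv, hc⟩ := IH (pvDecJ idx j) h d hd
      rw [hv]
      exact ihjs _ _ hc
    · simp only [h, dif_neg, not_false_iff]
      exact ihjs _ _ hd

theorem pvDpA_spec (ss : List (List Char)) :
    ∀ s : Nat, ∀ idx : List Nat, idx.sum = s → ∀ d, pvCorrect ss d →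
      (pvDpA ss d idx).1 = pvSpecDp ss idx ∧ pvCorrect ss (pvDpA ss d idx).2 := by
  intro s
  induction s using Nat.strong_induction_on with
  | _ s IHs =>
    intro idx hsum d hd
    rw [pvDpA]
    cases hg : d.get? idx with
    | some v => exact ⟨hd idx v hg, hd⟩
    | none =>
      by_cases h0 : idx.any (· == 0)
      · have hs : pvSpecDp ss idx = 0 := by rw [pvSpecDp]; simp [h0]
        simp only [h0, if_pos]
        exact ⟨hs.symm, pvCorrect_insert hd hs.symm⟩
      · simp only [h0, if_neg, Bool.not_eq_true]
        by_cases hne : idx = []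
        · subst hne
          have hs : pvSpecDp ss [] = 0 := by rw [pvSpecDp]; simp
          simp only [dif_pos rfl]
          exact ⟨hs.symm, pvCorrect_insert hd hs.symm⟩
        · simp only [hne, dif_neg, not_false_iff]
          have hspec : pvSpecDp ss idx =
              (if pvAllEq (pvChars ss idx) then pvSpecDp ss (pvDecAll idx) + 1
               else (pvSpecMax ss idx (List.range ss.length) none).getD 0) := by
            rw [pvSpecDp]
            simp [h0, hne]
          by_cases hall : pvAllEq (pvChars ss idx)
          · have hlt : (pvDecAll idx).sum < idx.sum :=
              pvSum_decAll_lt hne (pvNotMem_zero (by simpa using h0))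
            obtain ⟨hv, hc⟩ := IHs (pvDecAll idx).sum (hsum ▸ hlt) (pvDecAll idx) rfl d hd
            have hs : pvSpecDp ss idx = (pvDpA ss d (pvDecAll idx)).1 + 1 := by
              rw [hspec]; simp [hall, hv]
            simp only [hall, if_pos]
            exact ⟨hs.symm, pvCorrect_insert hc hs.symm⟩
          · have IH' : ∀ c : List Nat, c.sum < idx.sum → ∀ d', pvCorrect ss d' →
                (pvDpA ss d' c).1 = pvSpecDp ss c ∧ pvCorrect ss (pvDpA ss d' c).2 := by
              intro c hc d' hd'
              exact IHs c.sum (hsum ▸ hc) c rfl d' hd'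
            obtain ⟨hv, hc⟩ := pvDpAMax_spec ss idx IH' (List.range ss.length) none d hd
            have hs : pvSpecDp ss idx = (pvDpAMax ss d idx (List.range ss.length) none).1.getD 0 := by
              rw [hspec]; simp [hall, hv]
            simp only [hall, if_neg, Bool.not_eq_true]
            exact ⟨hs.symm, pvCorrect_insert hc hs.symm⟩

theorem pvRecAFind_spec (ss : List (List Char)) (idx : List Nat)
    (IHrec : ∀ c : List Nat, c.sum < idx.sum → ∀ d, pvCorrect ss d →
      (pvRecA ss d c).1 = pvRecPure ss c ∧ pvCorrect ss (pvRecA ss d c).2) :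
    ∀ js d, pvCorrect ss d →
      (pvRecAFind ss d idx js).1 = pvRecFindPure ss idx js ∧
        pvCorrect ss (pvRecAFind ss d idx js).2 := by
  intro js
  induction js with
  | nil => intro d hd; rw [pvRecAFind, pvRecFindPure]; exact ⟨rfl, hd⟩
  | cons j js' ihjs =>
    intro d hd
    rw [pvRecAFind, pvRecFindPure]
    obtain ⟨hv0, hc0⟩ := pvDpA_spec ss idx.sum idx rfl d hd
    obtain ⟨hv1, hc1⟩ :=
      pvDpA_spec ss (pvDecJ idx j).sum (pvDecJ idx j) rfl (pvDpA ss d idx).2 hc0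
    by_cases he : pvSpecDp ss idx = pvSpecDp ss (pvDecJ idx j)
    · simp only [hv0, hv1, he, if_pos]
      by_cases h : (pvDecJ idx j).sum < idx.sum
      · simp only [h, dif_pos]
        exact IHrec (pvDecJ idx j) h _ hc1
      · simp only [h, dif_neg, not_false_iff]
        exact ⟨trivial, hc1⟩
    · simp only [hv0, hv1, he, if_neg, not_false_iff]
      exact ihjs _ hc1

theorem pvRecA_spec (ss : List (List Char)) :
    ∀ s : Nat, ∀ idx : List Nat, idx.sum = s → ∀ d, pvCorrect ss d →
      (pvRecA ss d idx).1 = pvRecPure ss idx ∧ pvCorrect ss (pvRecA ss d idx).2 := by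
  intro s
  induction s using Nat.strong_induction_on with
  | _ s IHs =>
    intro idx hsum d hd
    rw [pvRecA, pvRecPure]
    by_cases h0 : idx.any (· == 0)
    · simp only [h0, if_pos]
      exact ⟨trivial, hd⟩
    · simp only [h0, if_neg, Bool.not_eq_true]
      by_cases hne : idx = []
      · simp only [hne, dif_pos]
        exact ⟨trivial, hd⟩
      · simp only [hne, dif_neg, not_false_iff]
        by_cases hall : pvAllEq (pvChars ss idx)
        · simp only [hall, if_pos]
          have hlt : (pvDecAll idx).sum < idx.sum :=
            pvSum_decAll_lt hne (pvNotMem_zero (by simpa using h0))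
          obtain ⟨hv, hc⟩ := IHs (pvDecAll idx).sum (hsum ▸ hlt) (pvDecAll idx) rfl d hd
          exact ⟨by rw [hv], hc⟩
        · simp only [hall, if_neg, Bool.not_eq_true]
          exact pvRecAFind_spec ss idx
            (fun c hc d' hd' => IHs c.sum (hsum ▸ hc) c rfl d' hd') _ _ hd

-- ---------- B-side: the enumeration of cells ----------

def pvProd : List Nat → List (List Nat)
  | [] => [[]]
  | ln :: ls => (List.range' 1 ln).flatMap (fun i => (pvProd ls).map (i :: ·))

theorem pvCells_eq_pvProd (L : List Nat) : pvCells L = pvProd L := by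
  unfold pvCells
  rw [List.foldl_reverse]
  induction L with
  | nil => rfl
  | cons a t ih => simp only [List.foldr_cons, ih]; rfl

theorem pvMem_pvProd {L : List Nat} {idx : List Nat} :
    idx ∈ pvProd L ↔ List.Forall₂ (fun v l => 1 ≤ v ∧ v ≤ l) idx L := by
  induction L generalizing idx with
  | nil =>
    simp only [pvProd, List.mem_singleton, List.forall₂_nil_right_iff]
  | cons l ls ih =>
    simp only [pvProd, List.mem_flatMap, List.mem_map, List.mem_range'_1,
      List.forall₂_cons_right_iff]
    constructor
    · rintro ⟨i, hi, t, ht, rfl⟩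
      exact ⟨i, t, by omega, ih.mp ht, rfl⟩
    · rintro ⟨i, t, hi, ht, rfl⟩
      exact ⟨i, by omega, t, ih.mpr ht, rfl⟩

theorem pvForall₂_pos {k L : List Nat} (h : List.Forall₂ (· ≤ ·) k L)
    (hz : ∀ x ∈ k, x ≠ 0) : List.Forall₂ (fun v l => 1 ≤ v ∧ v ≤ l) k L := by
  induction h with
  | nil => exact List.Forall₂.nil
  | @cons a b t L' hab _ ih =>
    exact List.Forall₂.cons ⟨by have := hz a (by simp); omega, hab⟩
      (ih (fun x hx => hz x (by simp [hx])))

theorem pvForall₂_le_of_pos {k L : List Nat}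
    (h : List.Forall₂ (fun v l => 1 ≤ v ∧ v ≤ l) k L) : List.Forall₂ (· ≤ ·) k L :=
  List.Forall₂.imp (fun _ _ hab => hab.2) h

theorem pvNoZero_of_pos {k L : List Nat}
    (h : List.Forall₂ (fun v l => 1 ≤ v ∧ v ≤ l) k L) : ∀ x ∈ k, x ≠ 0 := by
  induction h with
  | nil => simp
  | @cons a b t L' hab _ ih =>
    intro x hx
    rcases List.mem_cons.mp hx with rfl | hx
    · omega
    · exact ih x hx

theorem pvPairwise_pvProd (L : List Nat) :
    (pvProd L).Pairwise (List.Lex (· < ·)) := by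
  induction L with
  | nil => simp [pvProd]
  | cons l ls ih =>
    rw [pvProd, List.pairwise_flatMap]
    constructor
    · intro i _
      exact List.pairwise_map.mpr (ih.imp (fun h => List.Lex.cons h))
    · refine List.Pairwise.imp ?_ (List.pairwise_lt_range' (s := 1) (n := l) 1)
      rintro i i' hii x hx y hy
      obtain ⟨tx, _, rfl⟩ := List.mem_map.mp hx
      obtain ⟨ty, _, rfl⟩ := List.mem_map.mp hy
      exact List.Lex.rel hii

theorem pvMem_of_lex {s r : List (List Nat)} {c dep : List Nat}
    (hp : (s ++ c :: r).Pairwise (List.Lex (· < ·)))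
    (hm : dep ∈ s ++ c :: r) (hlex : List.Lex (· < ·) dep c) : dep ∈ s := by
  rcases List.mem_append.mp hm with h | h
  · exact h
  · rcases List.mem_cons.mp h with rfl | h
    · exact absurd hlex (Std.Asymm.asymm _ _ hlex)
    · have hp2 : (c :: r).Pairwise (List.Lex (· < ·)) := (List.pairwise_append.mp hp).2.1
      have : List.Lex (· < ·) c dep := (List.pairwise_cons.mp hp2).1 dep h
      exact absurd this (Std.Asymm.asymm _ _ hlex)

-- ---------- B-side: index-tuple arithmetic ----------

theorem pvMapIdx_noop (t : List Nat) (f : Nat → Nat → Nat) (h : ∀ i v, f i v = v) :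
    t.mapIdx f = t := by
  induction t generalizing f with
  | nil => rfl
  | cons a t ih =>
    rw [List.mapIdx_cons, h, ih _ (fun i v => h (i + 1) v)]

theorem pvDecJ_zero_cons (a : Nat) (t : List Nat) : pvDecJ (a :: t) 0 = (a - 1) :: t := by
  rw [pvDecJ, List.mapIdx_cons, pvMapIdx_noop _ _ (fun i v => by simp)]
  simp

theorem pvDecJ_succ_cons (a : Nat) (t : List Nat) (j : Nat) :
    pvDecJ (a :: t) (j + 1) = a :: pvDecJ t j := by
  rw [pvDecJ, List.mapIdx_cons]
  have h1 : (fun (i v : Nat) => if i + 1 = j + 1 then v - 1 else v)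
      = (fun (i v : Nat) => if i = j then v - 1 else v) := by
    funext i v; simp
  simp only [Nat.succ_ne_zero, if_neg, h1]
  rfl

theorem pvDecJSlice_eq_pvDecJ {idx : List Nat} {j : Nat} (h : j < idx.length) :
    pvDecJSlice idx j = pvDecJ idx j := by
  induction idx generalizing j with
  | nil => simp at h
  | cons a t ih =>
    cases j with
    | zero => simp [pvDecJSlice, pvDecJ_zero_cons]
    | succ j =>
      rw [pvDecJ_succ_cons]
      simp only [pvDecJSlice, List.take_succ_cons, List.getD_cons_succ, List.drop_succ_cons,
        List.cons_append]
      congr 1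
      exact ih (by simpa using h)

theorem pvSum_decJ_lt {idx : List Nat} {j : Nat} (hj : j < idx.length)
    (hz : ∀ x ∈ idx, x ≠ 0) : (pvDecJ idx j).sum < idx.sum := by
  induction idx generalizing j with
  | nil => simp at hj
  | cons a t ih =>
    cases j with
    | zero =>
      rw [pvDecJ_zero_cons]
      have ha : a ≠ 0 := hz a (by simp)
      simp only [List.sum_cons]
      omega
    | succ j =>
      rw [pvDecJ_succ_cons]
      simp only [List.sum_cons]
      have := ih (by simpa using hj) (fun x hx => hz x (by simp [hx]))
      omega

theorem pvLex_decJ {idx : List Nat} {j : Nat} (hj : j < idx.length)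
    (hz : ∀ x ∈ idx, x ≠ 0) : List.Lex (· < ·) (pvDecJ idx j) idx := by
  induction idx generalizing j with
  | nil => simp at hj
  | cons a t ih =>
    cases j with
    | zero =>
      rw [pvDecJ_zero_cons]
      exact List.Lex.rel (by have := hz a (by simp); omega)
    | succ j =>
      rw [pvDecJ_succ_cons]
      exact List.Lex.cons (ih (by simpa using hj) (fun x hx => hz x (by simp [hx])))

theorem pvLex_decAll {idx : List Nat} (hne : idx ≠ []) (hz : ∀ x ∈ idx, x ≠ 0) :
    List.Lex (· < ·) (pvDecAll idx) idx := by
  cases idx with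
  | nil => exact absurd rfl hne
  | cons a t =>
    simp only [pvDecAll, List.map_cons]
    exact List.Lex.rel (by have := hz a (by simp); omega)

theorem pvForall₂_decAll {idx L : List Nat} (h : List.Forall₂ (· ≤ ·) idx L) :
    List.Forall₂ (· ≤ ·) (pvDecAll idx) L := by
  induction h with
  | nil => simp [pvDecAll]
  | @cons a b t L' hab ht ih =>
    simp only [pvDecAll, List.map_cons]
    exact List.Forall₂.cons (by omega) (by simpa [pvDecAll] using ih)

theorem pvForall₂_decJ {idx L : List Nat} (h : List.Forall₂ (· ≤ ·) idx L) (j : Nat) :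
    List.Forall₂ (· ≤ ·) (pvDecJ idx j) L := by
  induction h generalizing j with
  | nil => exact List.Forall₂.nil
  | @cons a b t L' hab ht ih =>
    cases j with
    | zero => rw [pvDecJ_zero_cons]; exact List.Forall₂.cons (by omega) ht
    | succ j => rw [pvDecJ_succ_cons]; exact List.Forall₂.cons hab (ih j)

-- ---------- B-side: the max over neighbours ----------

theorem pvSpecMax_some (ss : List (List Char)) {idx : List Nat} (hz : ∀ x ∈ idx, x ≠ 0) :
    ∀ js : List Nat, (∀ j ∈ js, j < idx.length) → ∀ x : Nat,
      pvSpecMax ss idx js (some x) =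
        some ((js.map (fun j => pvSpecDp ss (pvDecJ idx j))).foldl max x) := by
  intro js
  induction js with
  | nil => intro _ x; rw [pvSpecMax]; rfl
  | cons j js' ih =>
    intro hjs x
    rw [pvSpecMax]
    have h := pvSum_decJ_lt (hjs j (by simp)) hz
    simp only [h, dif_pos]
    rw [ih (fun i hi => hjs i (by simp [hi]))]
    rfl

theorem pvSpecMax_none (ss : List (List Char)) {idx : List Nat} (hz : ∀ x ∈ idx, x ≠ 0)
    {j : Nat} {js : List Nat} (hjs : ∀ i ∈ j :: js, i < idx.length) :
    pvSpecMax ss idx (j :: js) none =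
      some ((js.map (fun i => pvSpecDp ss (pvDecJ idx i))).foldl max
        (pvSpecDp ss (pvDecJ idx j))) := by
  rw [pvSpecMax]
  have h := pvSum_decJ_lt (hjs j (by simp)) hz
  simp only [h, dif_pos]
  exact pvSpecMax_some ss hz js (fun i hi => hjs i (by simp [hi])) _

-- ---------- B-side: correctness of the bottom-up table ----------

theorem pvFill_go (ss : List (List Char)) (L : List Nat) (hL : L = ss.map List.length)
    (hssne : ss ≠ []) :
    ∀ (rest seen : List (List Nat)) (d : PySem.Dict (List Nat) Nat),
      seen ++ rest = pvProd L →
      (∀ k, ((d.get? k).isSome = true) ↔ k ∈ seen) →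
      pvCorrect ss d →
      (∀ k, (((rest.foldl (pvFillB ss) d).get? k).isSome = true) ↔ k ∈ seen ++ rest) ∧
        pvCorrect ss (rest.foldl (pvFillB ss) d) := by
  intro rest
  induction rest with
  | nil =>
    intro seen d _ hsome hcorr
    simpa using ⟨hsome, hcorr⟩
  | cons c rest' ih =>
    intro seen d hdecomp hsome hcorr
    have hcmem : c ∈ pvProd L := by rw [← hdecomp]; simp
    have hcpos : List.Forall₂ (fun v l => 1 ≤ v ∧ v ≤ l) c L := pvMem_pvProd.mp hcmem
    have hcvalid : List.Forall₂ (· ≤ ·) c L := pvForall₂_le_of_pos hcpos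
    have hz : ∀ x ∈ c, x ≠ 0 := pvNoZero_of_pos hcpos
    have h0 : c.any (· == 0) = false := by
      rw [← Bool.not_eq_true, List.any_eq_true]
      rintro ⟨x, hx, hx0⟩
      exact hz x hx (by simpa using hx0)
    have hclen : c.length = L.length := hcvalid.length_eq
    have hLlen : L.length = ss.length := by rw [hL]; simp
    have hcne : c ≠ [] := by
      intro h
      apply hssne
      have : ss.length = 0 := by rw [← hLlen, ← hclen, h]; rfl
      exact List.length_eq_zero_iff.mp this
    have hdep : ∀ k, List.Forall₂ (· ≤ ·) k L → List.Lex (· < ·) k c →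
        d.getD k 0 = pvSpecDp ss k := by
      intro k hkv hkl
      by_cases hk0 : k.any (· == 0)
      · have hknot : k ∉ seen := by
          intro hks
          have : k ∈ pvProd L := by rw [← hdecomp]; simp [hks]
          have := pvNoZero_of_pos (pvMem_pvProd.mp this)
          obtain ⟨x, hx, hx0⟩ := List.any_eq_true.mp hk0
          exact this x hx (by simpa using hx0)
        have hnone : d.get? k = none := by
          rcases hg : d.get? k with _ | v
          · rfl
          · exact absurd ((hsome k).mp (by rw [hg]; rfl)) hknot
        rw [PySem.Dict.getD_eq_get?_getD, hnone]
        rw [pvSpecDp]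
        simp [hk0]
      · have hkmem : k ∈ pvProd L :=
          pvMem_pvProd.mpr (pvForall₂_pos hkv (fun x hx hx0 =>
            absurd (List.any_eq_true.mpr ⟨x, hx, by simp [hx0]⟩) hk0))
        have hpw : (seen ++ c :: rest').Pairwise (List.Lex (· < ·)) := by
          rw [hdecomp]; exact pvPairwise_pvProd L
        have hkseen : k ∈ seen := pvMem_of_lex hpw (by rw [hdecomp]; exact hkmem) hkl
        obtain ⟨v, hv⟩ := Option.isSome_iff_exists.mp ((hsome k).mpr hkseen)
        rw [PySem.Dict.getD_eq_get?_getD, hv]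
        exact (hcorr k v hv).symm ▸ rfl
    have hval : pvFillB ss d c = d.insert c (pvSpecDp ss c) := by
      rw [pvFillB]
      by_cases hall : pvAllEq (pvChars ss c)
      · rw [if_pos hall]
        have hdeplex := pvLex_decAll hcne hz
        have hdepval := pvForall₂_decAll hcvalid
        have hlook := hdep (pvDecAll c) hdepval hdeplex
        have : pvSpecDp ss c = d.getD (pvDecAll c) 0 + 1 := by
          rw [pvSpecDp]
          simp [h0, hcne, hall, hlook]
        rw [this]
      · rw [if_neg hall]
        have hmapeq : (List.range ss.length).map (fun j => d.getD (pvDecJSlice c j) 0)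
            = (List.range ss.length).map (fun j => pvSpecDp ss (pvDecJ c j)) := by
          apply List.map_congr_left
          intro j hj
          have hjc : j < c.length := by
            rw [hclen, hLlen]; exact List.mem_range.mp hj
          rw [pvDecJSlice_eq_pvDecJ hjc]
          exact hdep (pvDecJ c j) (pvForall₂_decJ hcvalid j) (pvLex_decJ hjc hz)
        cases hr : List.range ss.length with
        | nil =>
          exfalso
          apply hssne
          have := List.length_range (n := ss.length)
          rw [hr] at this
          exact List.length_eq_zero_iff.mp this.symm
        | cons j js =>
          have hjs : ∀ i ∈ j :: js, i < c.length := by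
            intro i hi
            rw [hclen, hLlen]
            exact List.mem_range.mp (by rw [hr]; exact hi)
          have hspec : pvSpecDp ss c =
              ((js.map (fun i => pvSpecDp ss (pvDecJ c i))).foldl max
                (pvSpecDp ss (pvDecJ c j))) := by
            rw [pvSpecDp]
            simp only [h0, Bool.false_eq_true, if_neg, hcne, dif_neg, not_false_iff,
              hall, hr]
            rw [pvSpecMax_none ss hz (by rw [← hr] at hjs ⊢; exact hjs)]
            rfl
          rw [hr] at hmapeq
          rw [hmapeq, List.map_cons, PySem.List.max?_id_cons, hspec]
          rfl
    rw [List.foldl_cons, hval]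
    have hsome' : ∀ k, (((d.insert c (pvSpecDp ss c)).get? k).isSome = true) ↔
        k ∈ seen ++ [c] := by
      intro k
      rw [PySem.Dict.get?_insert]
      by_cases hk : k = c
      · simp [hk]
      · simp only [hk, if_neg, not_false_iff]
        rw [hsome k]
        simp [hk]
    have hcorr' : pvCorrect ss (d.insert c (pvSpecDp ss c)) := pvCorrect_insert hcorr rfl
    have hdecomp' : (seen ++ [c]) ++ rest' = pvProd L := by
      rw [← hdecomp]; simp
    obtain ⟨hs, hc⟩ := ih (seen ++ [c]) _ hdecomp' hsome' hcorr'
    refine ⟨?_, hc⟩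
    intro k
    rw [hs k]
    simp

theorem pvFill_correct (ss : List (List Char)) (L : List Nat) (hL : L = ss.map List.length)
    (hssne : ss ≠ []) {k : List Nat} (hk : List.Forall₂ (· ≤ ·) k L) :
    ((pvProd L).foldl (pvFillB ss) PySem.Dict.empty).getD k 0 = pvSpecDp ss k := by
  obtain ⟨hs, hc⟩ := pvFill_go ss L hL hssne (pvProd L) [] PySem.Dict.empty (by simp)
    (by intro k'; simp [PySem.Dict.get?_empty]) (pvCorrect_empty ss)
  by_cases hk0 : k.any (· == 0)
  · have hknot : k ∉ pvProd L := by
      intro hkm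
      have := pvNoZero_of_pos (pvMem_pvProd.mp hkm)
      obtain ⟨x, hx, hx0⟩ := List.any_eq_true.mp hk0
      exact this x hx (by simpa using hx0)
    have hnone : ((pvProd L).foldl (pvFillB ss) PySem.Dict.empty).get? k = none := by
      rcases hg : ((pvProd L).foldl (pvFillB ss) PySem.Dict.empty).get? k with _ | v
      · rfl
      · exact absurd ((hs k).mp (by rw [hg]; rfl)) (by simpa using hknot)
    rw [PySem.Dict.getD_eq_get?_getD, hnone]
    rw [pvSpecDp]
    simp [hk0]
  · have hkmem : k ∈ pvProd L :=
      pvMem_pvProd.mpr (pvForall₂_pos hk (fun x hx hx0 =>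
        absurd (List.any_eq_true.mpr ⟨x, hx, by simp [hx0]⟩) hk0))
    obtain ⟨v, hv⟩ := Option.isSome_iff_exists.mp ((hs k).mpr (by simpa using hkmem))
    rw [PySem.Dict.getD_eq_get?_getD, hv]
    exact (hc k v hv).symm ▸ rfl

-- ---------- B-side: the recovery loop ----------

theorem pvRecB_eq (ss : List (List Char)) (L : List Nat) (hL : L = ss.map List.length)
    (hssne : ss ≠ []) (d : PySem.Dict (List Nat) Nat)
    (hd : ∀ k, List.Forall₂ (· ≤ ·) k L → d.getD k 0 = pvSpecDp ss k) :
    ∀ s : Nat, ∀ idx : List Nat, idx.sum = s → List.Forall₂ (· ≤ ·) idx L → ∀ out,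
      pvRecB ss d idx out = out ++ (pvRecPure ss idx).reverse := by
  intro s
  induction s using Nat.strong_induction_on with
  | _ s IHs =>
    intro idx hsum hvalid out
    have hidxlen : idx.length = ss.length := by
      rw [hvalid.length_eq, hL]; simp
    have hidxne : idx ≠ [] := by
      intro h
      apply hssne
      apply List.length_eq_zero_iff.mp
      rw [← hidxlen, h]; rfl
    rw [pvRecB, pvRecPure]
    by_cases h0 : idx.any (· == 0)
    · simp [h0]
    · simp only [h0, if_neg, Bool.not_eq_true, hidxne, dif_neg, not_false_iff]
      have hz : ∀ x ∈ idx, x ≠ 0 := by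
        intro x hx hx0
        exact h0 (List.any_eq_true.mpr ⟨x, hx, by simp [hx0]⟩)
      by_cases hall : pvAllEq (pvChars ss idx)
      · simp only [hall, if_pos]
        have hlt : (pvDecAll idx).sum < idx.sum := pvSum_decAll_lt hidxne hz
        rw [IHs (pvDecAll idx).sum (hsum ▸ hlt) (pvDecAll idx) rfl
          (pvForall₂_decAll hvalid) _]
        simp
      · simp only [hall, if_neg, Bool.not_eq_true]
        have hfind : ∀ js : List Nat, (∀ i ∈ js, i < idx.length) →
            (match js.find? (fun j => d.getD idx 0 == d.getD (pvDecJSlice idx j) 0) with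
             | some j =>
               if _ : (pvDecJSlice idx j).sum < idx.sum then pvRecB ss d (pvDecJSlice idx j) out
               else out
             | none => out) = out ++ (pvRecFindPure ss idx js).reverse := by
          intro js
          induction js with
          | nil => intro _; rw [pvRecFindPure]; simp
          | cons j js' ihjs =>
            intro hjs
            have hjc : j < idx.length := hjs j (by simp)
            have hv0 : d.getD idx 0 = pvSpecDp ss idx := hd idx hvalid
            have hv1 : d.getD (pvDecJSlice idx j) 0 = pvSpecDp ss (pvDecJ idx j) := by
              rw [pvDecJSlice_eq_pvDecJ hjc]
              exact hd (pvDecJ idx j) (pvForall₂_decJ hvalid j)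
            rw [pvRecFindPure]
            by_cases he : pvSpecDp ss idx = pvSpecDp ss (pvDecJ idx j)
            · rw [List.find?_cons_of_pos (by rw [hv0, hv1]; simp [he])]
              have hlt : (pvDecJSlice idx j).sum < idx.sum := by
                rw [pvDecJSlice_eq_pvDecJ hjc]
                exact pvSum_decJ_lt hjc hz
              simp only [hlt, dif_pos]
              have hlt' : (pvDecJ idx j).sum < idx.sum := by
                rw [← pvDecJSlice_eq_pvDecJ hjc]; exact hlt
              rw [pvDecJSlice_eq_pvDecJ hjc]
              rw [IHs (pvDecJ idx j).sum (hsum ▸ hlt') (pvDecJ idx j) rfl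
                (pvForall₂_decJ hvalid j) out]
              simp only [he, if_pos, hlt', dif_pos]
            · rw [List.find?_cons_of_neg (by rw [hv0, hv1]; simp [he])]
              rw [ihjs (fun i hi => hjs i (by simp [hi]))]
              simp only [he, if_neg, not_false_iff]
        exact hfind (List.range ss.length)
          (fun i hi => by rw [hidxlen]; exact List.mem_range.mp hi)

-- ===== VERDICT (by name: the statement is the Claim_ definition above) =====
theorem mlcsdp_spec : Claim_equal_mlcsdp := by
  intro seqs _ hpre
  unfold Spec_mlcsdp mlcsdp mlcsdp_alt
  rw [if_neg hpre]
  have hssne : seqs.map (·.toList) ≠ [] := by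
    simpa using hpre
  have hvalidL : List.Forall₂ (· ≤ ·) ((seqs.map (·.toList)).map List.length)
      ((seqs.map (·.toList)).map List.length) := List.forall₂_refl _
  obtain ⟨hA1, hAc⟩ := pvDpA_spec (seqs.map (·.toList))
    ((seqs.map (·.toList)).map List.length).sum ((seqs.map (·.toList)).map List.length) rfl
    PySem.Dict.empty (pvCorrect_empty _)
  obtain ⟨hA2, _⟩ := pvRecA_spec (seqs.map (·.toList))
    ((seqs.map (·.toList)).map List.length).sum ((seqs.map (·.toList)).map List.length) rfl
    _ hAc
  have hdB : ∀ k, List.Forall₂ (· ≤ ·) k ((seqs.map (·.toList)).map List.length) →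
      ((pvCells ((seqs.map (·.toList)).map List.length)).foldl (pvFillB (seqs.map (·.toList)))
        PySem.Dict.empty).getD k 0 = pvSpecDp (seqs.map (·.toList)) k := by
    rw [pvCells_eq_pvProd]
    exact fun k hk => pvFill_correct _ _ rfl hssne hk
  have hrecB := pvRecB_eq (seqs.map (·.toList)) ((seqs.map (·.toList)).map List.length) rfl
    hssne _ hdB ((seqs.map (·.toList)).map List.length).sum _ rfl hvalidL []
  simp only [hA1, hA2, hrecB, hdB _ hvalidL, List.nil_append, List.reverse_reverse]
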